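-- pv_equiv track=rewrite | github.com/scszcoder/eCan.ai | build_system/generate_appcast.py | detect_os_and_arch
-- ===== SOURCE A (Python) =====
-- def detect_os_and_arch(filename: str) -> tuple:
--     """Detect OS and architecture from filename"""
--     name_lower = filename.lower()
--
--     # Detect operating system
--     if 'windows' in name_lower or name_lower.endswith('.exe') or name_lower.endswith('.msi'):
--         os_type = 'windows'
--     elif 'macos' in name_lower or 'darwin' in name_lower or name_lower.endswith('.pkg') or name_lower.endswith('.dmg'):
--         os_type = 'macos'
--     elif 'linux' in name_lower or name_lower.endswith('.appimage'):
--         os_type = 'linux'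
--     else:
--         os_type = 'unknown'
--
--     # Detect architecture
--     if any(x in name_lower for x in ['amd64', 'x86_64', 'x64']):
--         arch = 'x86_64'
--     elif any(x in name_lower for x in ['aarch64', 'arm64']):
--         arch = 'arm64'
--     else:
--         arch = 'universal'
--
--     return os_type, arch
-- ===== SOURCE B (Python) =====
-- # Different decomposition: instead of ordered if/elif chains, collect EVERY matching
-- # label (keyword dict + suffix dict) into a candidate list and take the minimum by a
-- # fixed priority, which reproduces the chain's precedence.
--
-- _OS_KEYWORDS = {'windows': 'windows', 'macos': 'macos', 'darwin': 'macos', 'linux': 'linux'}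
-- _SUFFIX_OS = {'.exe': 'windows', '.msi': 'windows', '.pkg': 'macos', '.dmg': 'macos', '.appimage': 'linux'}
-- _ARCH_KEYWORDS = {'amd64': 'x86_64', 'x86_64': 'x86_64', 'x64': 'x86_64', 'aarch64': 'arm64', 'arm64': 'arm64'}
-- _OS_PRIORITY = {'windows': 0, 'macos': 1, 'linux': 2, 'unknown': 3}
-- _ARCH_PRIORITY = {'x86_64': 0, 'arm64': 1, 'universal': 2}
--
--
-- def detect_os_and_arch(filename: str) -> tuple:
--     s = filename.lower()
--     os_hits = [label for kw, label in _OS_KEYWORDS.items() if kw in s] \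
--         + [label for suf, label in _SUFFIX_OS.items() if s.endswith(suf)] \
--         + ['unknown']
--     arch_hits = [label for kw, label in _ARCH_KEYWORDS.items() if kw in s] \
--         + ['universal']
--     return (min(os_hits, key=_OS_PRIORITY.__getitem__),
--             min(arch_hits, key=_ARCH_PRIORITY.__getitem__))
-- ===== Notes on version B (the rewrite author's own statement) =====
-- stated objective: alternative
-- what changed: Instead of A's ordered if/elif chains of substring/suffix tests, B collects every matching OS/arch label (from keyword and suffix dictionaries) into a candidate list and returns the minimum under a fixed priority map, relying on the fact that first-match-in-a-chain equals priority-minimum over all matches.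
import Mathlib
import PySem

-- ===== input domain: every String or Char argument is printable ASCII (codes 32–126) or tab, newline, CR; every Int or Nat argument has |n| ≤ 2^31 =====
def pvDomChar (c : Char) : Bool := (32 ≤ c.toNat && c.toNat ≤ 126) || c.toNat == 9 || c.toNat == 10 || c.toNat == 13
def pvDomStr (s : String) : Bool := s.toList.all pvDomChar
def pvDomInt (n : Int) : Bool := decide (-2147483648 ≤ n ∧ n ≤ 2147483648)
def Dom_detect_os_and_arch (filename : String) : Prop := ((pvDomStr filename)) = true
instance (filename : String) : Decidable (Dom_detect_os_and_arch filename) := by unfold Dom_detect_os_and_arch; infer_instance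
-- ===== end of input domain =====

-- B replaces A's ordered if/elif chains by collecting every matching label from keyword/suffix
-- dictionaries and taking the priority minimum (alternative decomposition, same cost);
-- return values are proved equal.


-- ===== PORT A =====
def detect_os_and_arch (filename : String) : String × String :=
  let name_lower := PySem.Str.lower filename
  let os_type :=
    if PySem.Str.isIn "windows" name_lower || PySem.Str.endswith name_lower ".exe"
        || PySem.Str.endswith name_lower ".msi" then "windows"
    else if PySem.Str.isIn "macos" name_lower || PySem.Str.isIn "darwin" name_lower
        || PySem.Str.endswith name_lower ".pkg" || PySem.Str.endswith name_lower ".dmg" then "macos"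
    else if PySem.Str.isIn "linux" name_lower || PySem.Str.endswith name_lower ".appimage" then "linux"
    else "unknown"
  let arch :=
    if (["amd64", "x86_64", "x64"] : List String).any (fun x => PySem.Str.isIn x name_lower) then "x86_64"
    else if (["aarch64", "arm64"] : List String).any (fun x => PySem.Str.isIn x name_lower) then "arm64"
    else "universal"
  (os_type, arch)

-- ===== PORT B =====
def pvOsKeywords : List (String × String) :=
  [("windows", "windows"), ("macos", "macos"), ("darwin", "macos"), ("linux", "linux")]
def pvSuffixOs : List (String × String) :=
  [(".exe", "windows"), (".msi", "windows"), (".pkg", "macos"), (".dmg", "macos"), (".appimage", "linux")]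
def pvArchKeywords : List (String × String) :=
  [("amd64", "x86_64"), ("x86_64", "x86_64"), ("x64", "x86_64"), ("aarch64", "arm64"), ("arm64", "arm64")]
def pvOsPriority : List (String × Int) :=
  [("windows", 0), ("macos", 1), ("linux", 2), ("unknown", 3)]
def pvArchPriority : List (String × Int) :=
  [("x86_64", 0), ("arm64", 1), ("universal", 2)]

def detect_os_and_arch_alt (filename : String) : String × String :=
  let s := PySem.Str.lower filename
  let os_hits :=
    (pvOsKeywords.foldr (fun p acc => if PySem.Str.isIn p.1 s then p.2 :: acc else acc) [])
      ++ (pvSuffixOs.foldr (fun p acc => if PySem.Str.endswith s p.1 then p.2 :: acc else acc) [])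
      ++ ["unknown"]
  let arch_hits :=
    (pvArchKeywords.foldr (fun p acc => if PySem.Str.isIn p.1 s then p.2 :: acc else acc) [])
      ++ ["universal"]
  -- min(list, key=priority.__getitem__); the lists always end in the default label, so
  -- min? is never none and getD's fallback is a totality guard only
  ((PySem.List.min? os_hits (fun l => PySem.Dict.getD (PySem.Dict.ofList pvOsPriority) l 0)).getD "unknown",
   (PySem.List.min? arch_hits (fun l => PySem.Dict.getD (PySem.Dict.ofList pvArchPriority) l 0)).getD "universal")

-- ===== PRECONDITION & SPEC =====
def Spec_detect_os_and_arch (filename : String) (out : String × String) : Prop := out = detect_os_and_arch_alt filename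
instance (filename : String) (out : String × String) : Decidable (Spec_detect_os_and_arch filename out) := by unfold Spec_detect_os_and_arch; infer_instance

-- ===== CLAIM =====
def Claim_equal_detect_os_and_arch : Prop := ∀ (filename : String), Dom_detect_os_and_arch filename → Spec_detect_os_and_arch filename (detect_os_and_arch filename)

-- ===== LEMMAS AND PROOFS =====

-- the conditional-cons list B's foldr builds, abstracted over the boolean tests
def pvMk (xs : List (Bool × String)) : List String :=
  xs.foldr (fun p acc => if p.1 then p.2 :: acc else acc) []

-- first-match chain = priority minimum over all matches, on the OS side
theorem pvOsEq (a1 a2 a3 a4 a5 a6 a7 a8 a9 : Bool) :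
    (if a1 || a2 || a3 then ("windows" : String)
     else if a4 || a5 || a6 || a7 then "macos"
     else if a8 || a9 then "linux" else "unknown")
    = (PySem.List.min?
        (pvMk [(a1, "windows"), (a4, "macos"), (a5, "macos"), (a8, "linux")]
          ++ pvMk [(a2, "windows"), (a3, "windows"), (a6, "macos"), (a7, "macos"), (a9, "linux")]
          ++ ["unknown"])
        (fun l => PySem.Dict.getD (PySem.Dict.ofList pvOsPriority) l 0)).getD "unknown" := by
  revert a1 a2 a3 a4 a5 a6 a7 a8 a9; decide

-- first-match chain = priority minimum over all matches, on the arch side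
theorem pvArchEq (b1 b2 b3 b4 b5 : Bool) :
    (if b1 || (b2 || (b3 || false)) then ("x86_64" : String)
     else if b4 || (b5 || false) then "arm64" else "universal")
    = (PySem.List.min?
        (pvMk [(b1, "x86_64"), (b2, "x86_64"), (b3, "x86_64"), (b4, "arm64"), (b5, "arm64")]
          ++ ["universal"])
        (fun l => PySem.Dict.getD (PySem.Dict.ofList pvArchPriority) l 0)).getD "universal" := by
  revert b1 b2 b3 b4 b5; decide

set_option maxHeartbeats 2000000 in
-- ===== VERDICT =====
theorem detect_os_and_arch_spec : Claim_equal_detect_os_and_arch := by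
  intro filename _
  unfold Spec_detect_os_and_arch detect_os_and_arch detect_os_and_arch_alt
  simp only [pvOsKeywords, pvSuffixOs, pvArchKeywords, List.foldr_cons, List.foldr_nil,
    List.any_cons, List.any_nil]
  refine congrArg₂ Prod.mk ?_ ?_
  · rw [pvOsEq]; simp only [pvMk, List.foldr_cons, List.foldr_nil]
  · exact pvArchEq (PySem.Str.isIn "amd64" (PySem.Str.lower filename))
      (PySem.Str.isIn "x86_64" (PySem.Str.lower filename))
      (PySem.Str.isIn "x64" (PySem.Str.lower filename))
      (PySem.Str.isIn "aarch64" (PySem.Str.lower filename))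
      (PySem.Str.isIn "arm64" (PySem.Str.lower filename))
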